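-- pv_equiv track=rewrite | github.com/Michaelmo12/Steganography-Security-Exercises-in-Python | q's/q6_null_cipher.py | null_cipher_hide
-- ===== SOURCE A (Python) =====
-- def null_cipher_hide(cover_text, secret, every_m_words=3, take_char_index=1):
--     words = cover_text.split()
--     s_idx = 0
--     for i in range(every_m_words - 1, len(words), every_m_words):
--         if s_idx >= len(secret):
--             break
--         w = words[i]
--         if len(w) <= take_char_index:
--             w += "." * (take_char_index + 1 - len(w))
--         w = w[:take_char_index] + secret[s_idx] + w[take_char_index + 1:]
--         words[i] = w
--         s_idx += 1
--     return " ".join(words)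
-- ===== SOURCE B (Python) =====
-- def null_cipher_hide(cover_text, secret, every_m_words=3, take_char_index=1):
--     # Chunking decomposition: split the word list into blocks of every_m_words,
--     # embed one secret char into the last word of each full block, and rebuild
--     # the text by concatenating blocks (no in-place index assignment, no counter).
--     words = cover_text.split()
--     if every_m_words <= 0:
--         return " ".join(words)
--     rest = list(secret)
--     rest.reverse()  # pop() then yields secret front-to-back
--     pieces = []
--     k = 0
--     while k < len(words) and rest:
--         chunk = words[k:k + every_m_words]
--         if len(chunk) == every_m_words:
--             w = chunk[-1]
--             if len(w) <= take_char_index: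
--                 w += "." * (take_char_index + 1 - len(w))
--             chunk[-1] = w[:take_char_index] + rest.pop() + w[take_char_index + 1:]
--         pieces.extend(chunk)
--         k += every_m_words
--     pieces.extend(words[k:])
--     return " ".join(pieces)
-- ===== Notes on version B (the rewrite author's own statement) =====
-- stated objective: alternative
-- what changed: B splits the word list into consecutive blocks of every_m_words words, embeds one secret character into the last word of each full block, and rebuilds the text by concatenating blocks, instead of A's in-place assignment at stepped absolute indices with a running secret counter.
import Mathlib
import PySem

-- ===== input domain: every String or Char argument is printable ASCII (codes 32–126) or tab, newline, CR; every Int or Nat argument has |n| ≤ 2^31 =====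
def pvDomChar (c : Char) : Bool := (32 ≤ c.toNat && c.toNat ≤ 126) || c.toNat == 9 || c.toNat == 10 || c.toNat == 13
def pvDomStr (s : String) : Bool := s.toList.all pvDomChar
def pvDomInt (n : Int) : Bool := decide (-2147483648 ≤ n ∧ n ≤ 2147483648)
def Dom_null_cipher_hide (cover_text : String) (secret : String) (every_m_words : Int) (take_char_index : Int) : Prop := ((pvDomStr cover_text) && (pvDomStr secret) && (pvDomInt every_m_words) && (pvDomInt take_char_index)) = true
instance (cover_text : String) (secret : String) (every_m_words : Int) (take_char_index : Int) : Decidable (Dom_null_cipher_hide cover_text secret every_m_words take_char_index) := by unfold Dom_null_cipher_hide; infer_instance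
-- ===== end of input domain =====

-- B chunks the word list into consecutive blocks of every_m_words words, embeds one
-- secret character into the last word of each full block, and rebuilds the text by
-- concatenating blocks — no in-place indexed assignment and no running secret counter
-- (objective: alternative, same cost).

-- ===== PORT A =====

-- pad the word with '.' if too short, then splice c at index tci (the literal body
-- 'if len(w) <= tci: w += "." * …; w = w[:tci] + c + w[tci+1:]', identical in A and B)
def nchSplice (w : List Char) (c : Char) (tci : Int) : List Char :=
  let w := if (w.length : Int) ≤ tci then w ++ PySem.List.pyRepeat ['.'] (tci + 1 - (w.length : Int)) else w
  PySem.List.slice w none (some tci) ++ [c] ++ PySem.List.slice w (some (tci + 1)) none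

-- 'for i in range(...): if s_idx >= len(secret): break; …' — structural recursion over
-- the range list carrying (words, s_idx).  words[i] / words[i] = w use pyGetD/pySetD:
-- every i produced by the range is a valid index (0 ≤ m-1 ≤ i < len(words)), so the
-- defaults are never consulted and the port is exact.
def nchLoopA (secret : List Char) (tci : Int) : List Int → List (List Char) → Int → List (List Char)
  | [], words, _ => words
  | i :: rest, words, sIdx =>
    if (secret.length : Int) ≤ sIdx then words
    else
      nchLoopA secret tci rest
        (PySem.List.pySetD words i (nchSplice (PySem.List.pyGetD words i []) (PySem.List.pyGetD secret sIdx '.') tci))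
        (sIdx + 1)

def null_cipher_hide (cover_text : String) (secret : String) (every_m_words : Int) (take_char_index : Int) : String :=
  let words := (PySem.Str.split₀ cover_text).map String.toList
  String.ofList (PySem.Chars.join [' ']
    (nchLoopA secret.toList take_char_index
      (PySem.List.pyRange (every_m_words - 1) (words.length : Int) every_m_words) words 0))

-- ===== PORT B =====

-- B's while loop: peel the next block words[k:k+m] (here: take m of the remaining
-- words), splice the next secret char into its last word when the block is full,
-- append the block, advance k by m.  Source B's 'rest.reverse()' + 'rest.pop()' consumes
-- the secret front-to-back, so 'rest' here is that front-to-back residue; the dite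
-- guard on m = 0 is a totality guard only — the caller enters the loop only for m > 0.
def nchLoopB (tci : Int) (m : Nat) : List (List Char) → List Char → List (List Char)
  | [], _ => []
  | w :: ws', [] => w :: ws'
  | w :: ws', ch :: rest' =>
    if hm0 : m = 0 then w :: ws'
    else
      let chunk := (w :: ws').take m
      if chunk.length = m then
        PySem.List.pySetD chunk (-1) (nchSplice (PySem.List.pyGetD chunk (-1) []) ch tci)
          ++ nchLoopB tci m ((w :: ws').drop m) rest'
      else
        chunk ++ nchLoopB tci m ((w :: ws').drop m) (ch :: rest')
  termination_by ws _ => ws.length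
  decreasing_by
    · simp only [List.length_drop, List.length_cons]; omega
    · simp only [List.length_drop, List.length_cons]; omega

def null_cipher_hide_alt (cover_text : String) (secret : String) (every_m_words : Int) (take_char_index : Int) : String :=
  let words := (PySem.Str.split₀ cover_text).map String.toList
  if every_m_words ≤ 0 then String.ofList (PySem.Chars.join [' '] words)
  else
    String.ofList (PySem.Chars.join [' ']
      (nchLoopB take_char_index every_m_words.toNat words secret.toList))

-- ===== PRECONDITION & SPEC =====
-- Python A raises ValueError ('range() arg 3 must not be zero') when every_m_words == 0;
-- Pre_ excludes exactly those inputs.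
def Pre_null_cipher_hide (cover_text : String) (secret : String) (every_m_words : Int) (take_char_index : Int) : Prop :=
  every_m_words ≠ 0
instance (cover_text : String) (secret : String) (every_m_words : Int) (take_char_index : Int) : Decidable (Pre_null_cipher_hide cover_text secret every_m_words take_char_index) := by unfold Pre_null_cipher_hide; infer_instance

def pvWitness_null_cipher_hide : String × String × Int × Int := ("a b c", "z", 3, 1)

def Spec_null_cipher_hide (cover_text : String) (secret : String) (every_m_words : Int) (take_char_index : Int) (out : String) : Prop := out = null_cipher_hide_alt cover_text secret every_m_words take_char_index
instance (cover_text : String) (secret : String) (every_m_words : Int) (take_char_index : Int) (out : String) : Decidable (Spec_null_cipher_hide cover_text secret every_m_words take_char_index out) := by unfold Spec_null_cipher_hide; infer_instance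

-- ===== CLAIM (what is proved, stated in full; the proofs are below) =====
def Claim_equal_null_cipher_hide : Prop := ∀ (cover_text : String) (secret : String) (every_m_words : Int) (take_char_index : Int), Dom_null_cipher_hide cover_text secret every_m_words take_char_index → Pre_null_cipher_hide cover_text secret every_m_words take_char_index → Spec_null_cipher_hide cover_text secret every_m_words take_char_index (null_cipher_hide cover_text secret every_m_words take_char_index)

-- ===== LEMMAS AND PROOFS =====

-- unfolding equations of B's chunk recursion
lemma nchLoopB_nil (tci : Int) (m : Nat) (rest : List Char) : nchLoopB tci m [] rest = [] := by
  cases rest <;> rw [nchLoopB]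

lemma nchLoopB_rnil (tci : Int) (m : Nat) (w : List Char) (ws' : List (List Char)) :
    nchLoopB tci m (w :: ws') [] = w :: ws' := by rw [nchLoopB]

lemma nchLoopB_cons_full (tci : Int) (m : Nat) (w : List Char) (ws' : List (List Char))
    (ch : Char) (rest' : List Char) (hm0 : m ≠ 0) (hfull : ((w :: ws').take m).length = m) :
    nchLoopB tci m (w :: ws') (ch :: rest')
      = PySem.List.pySetD ((w :: ws').take m) (-1)
          (nchSplice (PySem.List.pyGetD ((w :: ws').take m) (-1) []) ch tci)
        ++ nchLoopB tci m ((w :: ws').drop m) rest' := by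
  rw [nchLoopB]; rw [dif_neg hm0, if_pos hfull]

lemma nchLoopB_cons_part (tci : Int) (m : Nat) (w : List Char) (ws' : List (List Char))
    (ch : Char) (rest' : List Char) (hm0 : m ≠ 0) (hpart : ¬ ((w :: ws').take m).length = m) :
    nchLoopB tci m (w :: ws') (ch :: rest')
      = (w :: ws').take m ++ nchLoopB tci m ((w :: ws').drop m) (ch :: rest') := by
  rw [nchLoopB]; rw [dif_neg hm0, if_neg hpart]

-- a positive-step range is empty iff it starts at or past the stop
lemma pyRange_pos_eq_nil (a b s : Int) (hs : 0 < s) (h : b ≤ a) :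
    PySem.List.pyRange a b s = [] := by
  rw [PySem.List.pyRange_of_pos a b hs]
  simp [show ¬ a < b by omega]

-- a positive-step range that is not past the stop peels off its start
lemma pyRange_pos_cons (a b s : Int) (hs : 0 < s) (h : a < b) :
    PySem.List.pyRange a b s = a :: PySem.List.pyRange (a + s) b s := by
  rw [PySem.List.pyRange_of_pos a b hs, PySem.List.pyRange_of_pos (a + s) b hs]
  have hcnt : ((b - a + s - 1) / s).toNat =
      (if a + s < b then ((b - (a + s) + s - 1) / s).toNat else 0) + 1 := by
    by_cases hc : a + s < b
    · simp only [hc, if_pos]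
      have : b - a + s - 1 = (b - (a + s) + s - 1) + 1 * s := by ring
      rw [this, Int.add_mul_ediv_right _ _ (by omega : s ≠ 0)]
      have h0 : 0 ≤ (b - (a + s) + s - 1) / s :=
        Int.ediv_nonneg (by omega) (by omega)
      omega
    · simp only [hc, if_neg, not_false_iff]
      have h1 : (1 : Int) ≤ (b - a + s - 1) / s := by
        rw [Int.le_ediv_iff_mul_le hs]; omega
      have h2 : (b - a + s - 1) / s < 2 := by
        rw [Int.ediv_lt_iff_lt_mul hs]; omega
      omega
  rw [if_pos h, hcnt, List.range_succ_eq_map, List.map_cons, List.map_map]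
  refine List.cons_eq_cons.mpr ⟨by push_cast; ring, ?_⟩
  apply List.map_congr_left; intro k _
  simp only [Function.comp_apply]; push_cast; ring

-- a negative-step range starting below its stop is empty (m < 0: A's loop is a no-op)
lemma pyRange_neg_eq_nil (a b s : Int) (hs : s < 0) (h : a ≤ b) :
    PySem.List.pyRange a b s = [] := by
  simp only [PySem.List.pyRange]
  rw [if_neg (by omega)]
  simp [show ¬ b < a by omega, show ¬ 0 < s by omega]

-- shifting a positive-step range's start and stop by the step shifts its elements
lemma pyRange_shift (a L m : Int) (hm : 0 < m) :
    PySem.List.pyRange (a + m) L m = (PySem.List.pyRange a (L - m) m).map (· + m) := by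
  rw [PySem.List.pyRange_of_pos _ _ hm, PySem.List.pyRange_of_pos _ _ hm, List.map_map]
  have h1 : L - (a + m) + m - 1 = L - m - a + m - 1 := by ring
  rw [h1]
  have h2 : (if a + m < L then ((L - m - a + m - 1) / m).toNat else 0)
      = (if a < L - m then ((L - m - a + m - 1) / m).toNat else 0) := by
    by_cases h : a + m < L
    · rw [if_pos h, if_pos (by omega)]
    · rw [if_neg h, if_neg (by omega)]
  rw [h2]
  apply List.map_congr_left; intro k _
  simp only [Function.comp_apply]; ring

-- setting index m+n splits as: keep the first m elements, set n in the rest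
lemma set_add_split {α : Type} (v : α) :
    ∀ (ws : List α) (m n : Nat), ws.set (m + n) v = ws.take m ++ (ws.drop m).set n v := by
  intro ws
  induction ws with
  | nil => intro m n; simp
  | cons w ws ih =>
    intro m n
    cases m with
    | zero => simp
    | succ m' => simpa [Nat.succ_add] using ih m' n

-- setting index n < m splits as: set n in the first m elements, keep the rest
lemma set_take_split {α : Type} (v : α) :
    ∀ (ws : List α) (m n : Nat), n < m → ws.set n v = (ws.take m).set n v ++ ws.drop m := by
  intro ws
  induction ws with
  | nil => intro m n _; simp
  | cons w ws ih =>
    intro m n hnm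
    cases m with
    | zero => omega
    | succ m' =>
      cases n with
      | zero => simp
      | succ n' => simpa using ih m' n' (by omega)

-- reading an index ≥ m reads the dropped tail
lemma getD_add_split {α : Type} (ws : List α) (m n : Nat) (d : α) :
    ws.getD (m + n) d = (ws.drop m).getD n d := by
  simp [List.getD_eq_getElem?_getD, List.getElem?_drop]

-- A's loop over indices shifted up by m leaves the first m words alone and acts on the rest
lemma loopA_shift (secret : List Char) (tci : Int) (m : Nat) :
    ∀ (is : List Int) (ws : List (List Char)) (sIdx : Int),
      (∀ i ∈ is, 0 ≤ i) → m ≤ ws.length →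
      nchLoopA secret tci (is.map (· + (m : Int))) ws sIdx
        = ws.take m ++ nchLoopA secret tci is (ws.drop m) sIdx := by
  intro is
  induction is with
  | nil => intro ws sIdx _ _; simp [nchLoopA]
  | cons i is' ih =>
    intro ws sIdx hnn hlen
    have hi : 0 ≤ i := hnn i (List.mem_cons_self ..)
    simp only [List.map_cons, nchLoopA]
    by_cases hs : (secret.length : Int) ≤ sIdx
    · rw [if_pos hs, if_pos hs, List.take_append_drop]
    · rw [if_neg hs, if_neg hs]
      have htn : (i + (m : Int)).toNat = m + i.toNat := by omega
      have hget : PySem.List.pyGetD ws (i + (m : Int)) ([] : List Char)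
          = PySem.List.pyGetD (ws.drop m) i ([] : List Char) := by
        rw [show i + (m : Int) = ((m + i.toNat : Nat) : Int) by omega, PySem.List.pyGetD_natCast]
        conv_rhs => rw [show i = ((i.toNat : Nat) : Int) by omega]
        rw [PySem.List.pyGetD_natCast, getD_add_split]
      set v := nchSplice (PySem.List.pyGetD (ws.drop m) i ([] : List Char))
        (PySem.List.pyGetD secret sIdx '.') tci with hv
      have hset : PySem.List.pySetD ws (i + (m : Int)) v
          = ws.take m ++ PySem.List.pySetD (ws.drop m) i v := by
        rw [PySem.List.pySetD_of_nonneg _ _ (by omega), PySem.List.pySetD_of_nonneg _ _ hi,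
          htn, set_add_split]
      rw [hget, hset]
      have hlen' : m ≤ (ws.take m ++ PySem.List.pySetD (ws.drop m) i v).length := by
        simp [PySem.List.length_pySetD]; omega
      rw [ih _ _ (fun j hj => hnn j (List.mem_cons_of_mem _ hj)) hlen']
      rw [List.take_left' (by rw [List.length_take]; omega),
        List.drop_left' (by rw [List.length_take]; omega)]

-- the key agreement: A's stepped-index loop over ws equals B's chunk recursion
lemma chunk_eq (secret : List Char) (tci : Int) (m : Nat) (hm : 0 < m) :
    ∀ (n : Nat) (ws : List (List Char)), ws.length = n → ∀ (sIdx : Nat),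
      nchLoopA secret tci
          (PySem.List.pyRange ((m : Int) - 1) (ws.length : Int) m) ws (sIdx : Int)
        = nchLoopB tci m ws (secret.drop sIdx) := by
  intro n
  induction n using Nat.strong_induction_on with
  | _ n ih =>
    intro ws hlen sIdx
    have hmZ : (0 : Int) < (m : Int) := by exact_mod_cast hm
    by_cases hlt : ws.length < m
    · -- no full block: A's range is empty, B copies the remainder through
      rw [pyRange_pos_eq_nil _ _ _ hmZ (by push_cast; omega)]
      cases ws with
      | nil => rw [nchLoopB_nil]; simp [nchLoopA]
      | cons w ws' =>
        cases hrest : secret.drop sIdx with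
        | nil => rw [nchLoopB_rnil]; simp [nchLoopA]
        | cons ch rest' =>
          rw [nchLoopB_cons_part tci m w ws' ch rest' (by omega)
            (by rw [List.length_take]; simp at hlt ⊢; omega)]
          rw [List.take_of_length_le (by simp at hlt ⊢; omega),
            List.drop_eq_nil_of_le (by simp at hlt ⊢; omega), nchLoopB_nil]
          simp [nchLoopA]
    · have hge : m ≤ ws.length := by omega
      obtain ⟨w, ws', rfl⟩ : ∃ w ws', ws = w :: ws' := by
        cases ws with
        | nil => simp at hge; omega
        | cons a b => exact ⟨a, b, rfl⟩
      rw [pyRange_pos_cons _ _ _ hmZ (by push_cast; omega)]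
      cases hrest : secret.drop sIdx with
      | nil =>
        have hs : secret.length ≤ sIdx := List.drop_eq_nil_iff.mp hrest
        rw [nchLoopB_rnil]
        simp only [nchLoopA]
        rw [if_pos (by exact_mod_cast hs)]
      | cons ch rest' =>
        have hsl : sIdx < secret.length := by
          by_contra hge'
          rw [List.drop_eq_nil_of_le (by omega)] at hrest
          simp at hrest
        have hch : PySem.List.pyGetD secret (sIdx : Int) '.' = ch := by
          have h0 : secret[sIdx]? = some ch := by
            have := List.getElem?_drop (xs := secret) (i := sIdx) (j := 0)
            rw [hrest] at this
            simpa using this.symm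
          simp [PySem.List.pyGetD_natCast, List.getD_eq_getElem?_getD, h0]
        have hrest' : secret.drop (sIdx + 1) = rest' := by
          have h : (secret.drop sIdx).tail = rest' := by rw [hrest, List.tail_cons]
          rwa [List.tail_drop] at h
        have hclen : ((w :: ws').take m).length = m := by
          rw [List.length_take]; simp at hge ⊢; omega
        rw [nchLoopB_cons_full tci m w ws' ch rest' (by omega) hclen]
        simp only [nchLoopA]
        rw [if_neg (by exact_mod_cast Nat.not_le.mpr hsl), hch]
        have hm1 : ((m : Int) - 1).toNat = m - 1 := by omega
        -- A's read at m-1 is B's read at -1 in the chunk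
        have hne : (w :: ws').take m ≠ [] := by
          intro h; rw [h] at hclen; simp at hclen; omega
        have hget : PySem.List.pyGetD (w :: ws') ((m : Int) - 1) ([] : List Char)
            = PySem.List.pyGetD ((w :: ws').take m) (-1) ([] : List Char) := by
          rw [PySem.List.pyGetD_neg_one _ _ hne,
            show (m : Int) - 1 = ((m - 1 : Nat) : Int) by omega, PySem.List.pyGetD_natCast]
          rw [List.getLast_eq_getElem, List.getD_eq_getElem _ _ (by simp at hge ⊢; omega)]
          simp only [List.getElem_take, hclen]
        rw [hget]
        set v := nchSplice (PySem.List.pyGetD ((w :: ws').take m) (-1) ([] : List Char)) ch tci with hv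
        -- A's write at m-1 is B's write at -1 in the chunk
        have hsetneg : PySem.List.pySetD ((w :: ws').take m) (-1) v
            = ((w :: ws').take m).set (m - 1) v := by
          simp only [PySem.List.pySetD, PySem.List.pySet?, PySem.List.pyIdx?]
          rw [hclen]
          simp [show ¬ (0 : Int) ≤ -1 by omega]
          rw [if_pos (show 1 ≤ m by omega)]
          rfl
        have hset : PySem.List.pySetD (w :: ws') ((m : Int) - 1) v
            = PySem.List.pySetD ((w :: ws').take m) (-1) v ++ (w :: ws').drop m := by
          rw [hsetneg, PySem.List.pySetD_of_nonneg _ _ (by omega), hm1]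
          exact set_take_split v (w :: ws') m (m - 1) (by omega)
        rw [hset]
        have hfirstlen : (PySem.List.pySetD ((w :: ws').take m) (-1) v).length = m := by
          rw [PySem.List.length_pySetD, hclen]
        -- shift the remaining range down by m and split off the settled block
        rw [pyRange_shift ((m : Int) - 1) ((w :: ws').length : Int) (m : Int) hmZ]
        have hnn : ∀ i ∈ PySem.List.pyRange ((m : Int) - 1) (((w :: ws').length : Int) - m) m, 0 ≤ i := by
          intro i hi
          rw [PySem.List.pyRange_of_pos _ _ hmZ] at hi
          obtain ⟨k, _, rfl⟩ := List.mem_map.mp hi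
          have : (0 : Int) ≤ (m : Int) * (k : Int) :=
            mul_nonneg (by omega) (Int.natCast_nonneg k)
          omega
        rw [loopA_shift secret tci m _ _ _ hnn (by rw [List.length_append, hfirstlen]; omega)]
        rw [List.take_left' hfirstlen, List.drop_left' hfirstlen]
        have hdlen : ((((w :: ws').drop m).length : Nat) : Int) = ((w :: ws').length : Int) - m := by
          rw [List.length_drop]; push_cast; omega
        rw [← hdlen]
        have hIH := ih ((w :: ws').length - m) (by omega) ((w :: ws').drop m)
          (by rw [List.length_drop]) (sIdx + 1)
        rw [show ((sIdx : Int) + 1) = ((sIdx + 1 : Nat) : Int) by push_cast; ring, hIH, hrest']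

-- ===== VERDICT (by name: the statement is the Claim_ definition above) =====
theorem null_cipher_hide_spec : Claim_equal_null_cipher_hide := by
  intro cover_text secret every_m_words take_char_index _ hpre
  simp only [Spec_null_cipher_hide, null_cipher_hide, null_cipher_hide_alt]
  rcases lt_trichotomy every_m_words 0 with hneg | hz | hpos
  · rw [if_pos (by omega),
      pyRange_neg_eq_nil (every_m_words - 1)
        ((((PySem.Str.split₀ cover_text).map String.toList).length : Int)) every_m_words hneg
        (by omega)]
    rfl
  · exact absurd hz hpre
  · rw [if_neg (by omega)]
    have h0 := chunk_eq secret.toList take_char_index every_m_words.toNat (by omega)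
      ((PySem.Str.split₀ cover_text).map String.toList).length
      ((PySem.Str.split₀ cover_text).map String.toList) rfl 0
    simp only [Nat.cast_zero, List.drop_zero] at h0
    rw [show every_m_words = ((every_m_words.toNat : Nat) : Int) by omega, h0, Int.toNat_natCast]
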